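-- pv_equiv track=rewrite | github.com/saeyoon17/DeepLearningExamples | PyTorch/Recommendation/DLRM/triton/client.py | distribute_to_buckets
-- ===== SOURCE A (Python) =====
-- import math
-- from collections import deque
-- from typing import List, Optional, Sequence, Tuple
--
-- def argsort(sequence, reverse: bool = False):
--     idx_pairs = [(x, i) for i, x in enumerate(sequence)]
--     sorted_pairs = sorted(idx_pairs, key=lambda pair: pair[0], reverse=reverse)
--     return [i for _, i in sorted_pairs]
--
-- def distribute_to_buckets(sizes: Sequence[int], buckets_num: int):
--     def sum_sizes(indices):
--         return sum(sizes[i] for i in indices)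
--
--     max_bucket_size = math.ceil(len(sizes) / buckets_num)
--     idx_sorted = deque(argsort(sizes, reverse=True))
--     buckets = [[] for _ in range(buckets_num)]
--     final_buckets = []
--
--     while idx_sorted:
--         bucket = buckets[0]
--         bucket.append(idx_sorted.popleft())
--
--         if len(bucket) == max_bucket_size:
--             final_buckets.append(buckets.pop(0))
--
--         buckets.sort(key=sum_sizes)
--
--     final_buckets += buckets
--
--     return final_buckets
-- ===== SOURCE B (Python) =====
-- import math
--
--
-- def _rank(h):
--     return 0 if h is None else h[3]
--
--
-- def _merge(a, b):
--     """Merge two leftist heaps keyed by the (cached_sum, priority) pair."""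
--     if a is None:
--         return b
--     if b is None:
--         return a
--     if (b[0], b[1]) < (a[0], a[1]):
--         a, b = b, a
--     s, p, items, _rk, l, r = a
--     m = _merge(r, b)
--     if _rank(l) < _rank(m):
--         l, m = m, l
--     return (s, p, items, _rank(m) + 1, l, m)
--
--
-- def distribute_to_buckets(sizes, buckets_num):
--     max_bucket_size = math.ceil(len(sizes) / buckets_num)
--     order = sorted(range(len(sizes)), key=lambda i: -sizes[i])
--     # initial heap: all buckets are empty with keys (0, 0) < (0, 1) < ...; built
--     # directly as a left spine, which is a valid leftist heap for ascending keys
--     heap = None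
--     for k in reversed(range(buckets_num)):
--         heap = (0, k, [], 1, heap, None)
--     final_buckets = []
--     next_prio = -1
--     for i in order:
--         s, _p, items, _rk, l, r = heap
--         heap = _merge(l, r)
--         items.append(i)
--         if len(items) == max_bucket_size:
--             final_buckets.append(items)
--         else:
--             heap = _merge(heap, (s + sizes[i], next_prio, items, 1, None, None))
--             next_prio -= 1
--     while heap is not None:
--         _s, _p, items, _rk, l, r = heap
--         heap = _merge(l, r)
--         final_buckets.append(items)
--     return final_buckets
-- ===== Notes on version B (the rewrite author's own statement) =====
-- stated objective: faster
-- what changed: Replaces A's per-item full re-sort of the bucket list (with bucket sums recomputed from scratch by sum_sizes each time) by a leftist min-heap of (cached sum, priority, items) nodes, initialised as a left spine; a strictly decreasing priority counter reproduces the stable sort's tie order, so each step is one heap pop and one push.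
import Mathlib
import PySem

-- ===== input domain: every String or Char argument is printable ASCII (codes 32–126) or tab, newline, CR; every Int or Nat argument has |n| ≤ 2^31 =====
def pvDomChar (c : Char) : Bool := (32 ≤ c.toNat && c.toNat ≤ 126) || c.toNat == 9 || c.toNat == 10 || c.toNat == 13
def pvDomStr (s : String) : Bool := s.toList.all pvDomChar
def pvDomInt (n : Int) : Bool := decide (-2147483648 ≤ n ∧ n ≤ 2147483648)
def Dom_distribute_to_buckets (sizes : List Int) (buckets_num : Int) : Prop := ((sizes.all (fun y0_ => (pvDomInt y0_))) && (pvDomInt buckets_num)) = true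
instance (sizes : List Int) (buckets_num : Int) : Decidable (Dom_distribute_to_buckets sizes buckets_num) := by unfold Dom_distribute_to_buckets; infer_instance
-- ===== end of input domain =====

-- B replaces A's per-item full re-sort (bucket sums recomputed from scratch each time) by a
-- leftist min-heap of (cached sum, priority, items) nodes; a strictly decreasing priority
-- counter reproduces the stable sort's tie order. math.ceil(len/bn) is ported as the exact
-- ceiling -((-len)//bn) (exact for list lengths far below float-rounding range).
-- A mutates nothing observable; B mutates its private bucket lists only.

-- ===== PORT A =====
-- sum_sizes(indices) = sum(sizes[i] for i in indices); indices produced by argsort are in range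
def pvSumSizes (sizes : List Int) (indices : List Int) : Int :=
  (indices.map (fun i => PySem.List.pyGetD sizes i 0)).sum

-- argsort(sizes, reverse=True)
def pvArgsortRev (sizes : List Int) : List Int :=
  (PySem.List.sorted ((PySem.List.enumerate sizes 0).map (fun p => (p.2, p.1)))
    (fun p => p.1) true).map (fun p => p.2)

-- the while-loop of A: state = (remaining idx deque, open buckets, final buckets)
def pvLoopA (sizes : List Int) (maxB : Int) : List Int → List (List Int) → List (List Int) → List (List Int)
  | [], buckets, final => final ++ buckets
  | i :: rest, buckets, final =>
    match buckets with
    | [] => final  -- unreachable under Pre_ (Python raises IndexError here)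
    | b :: bs =>
      let b' := b ++ [i]
      if PySem.List.len b' == maxB then
        pvLoopA sizes maxB rest (PySem.List.sorted bs (pvSumSizes sizes) false) (final ++ [b'])
      else
        pvLoopA sizes maxB rest (PySem.List.sorted (b' :: bs) (pvSumSizes sizes) false) final

def distribute_to_buckets (sizes : List Int) (buckets_num : Int) : List (List Int) :=
  let max_bucket_size := -(PySem.Int.floordiv (-(PySem.List.len sizes)) buckets_num)
  let idx_sorted := pvArgsortRev sizes
  let buckets := (List.range buckets_num.toNat).map (fun _ => ([] : List Int))
  pvLoopA sizes max_bucket_size idx_sorted buckets []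

-- ===== PORT B =====
-- leftist heap node: (cached sum, priority, items, rank, left, right); None = nil
inductive PvHeap : Type
  | nil : PvHeap
  | node : Int → Int → List Int → Int → PvHeap → PvHeap → PvHeap
deriving DecidableEq, Repr

def pvHeapSize : PvHeap → Nat
  | .nil => 0
  | .node _ _ _ _ l r => pvHeapSize l + pvHeapSize r + 1

-- _rank of Source B
def pvRank : PvHeap → Int
  | .nil => 0
  | .node _ _ _ rk _ _ => rk

-- _merge of Source B (the 'if (b[0],b[1]) < (a[0],a[1]): a,b = b,a' swap is the two branches);
-- the fuel argument is a totality guard only: it is always called with fuel = total node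
-- count, which the recursion never exhausts
def pvMergeF : Nat → PvHeap → PvHeap → PvHeap
  | 0, _, _ => .nil
  | _, .nil, b => b
  | _, .node s p it rk l r, .nil => .node s p it rk l r
  | fuel + 1, .node s p it rk l r, .node s2 p2 it2 rk2 l2 r2 =>
    if s2 < s ∨ (s2 = s ∧ p2 < p) then
      if pvRank l2 < pvRank (pvMergeF fuel r2 (.node s p it rk l r)) then
        .node s2 p2 it2 (pvRank l2 + 1) (pvMergeF fuel r2 (.node s p it rk l r)) l2
      else .node s2 p2 it2 (pvRank (pvMergeF fuel r2 (.node s p it rk l r)) + 1) l2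
        (pvMergeF fuel r2 (.node s p it rk l r))
    else
      if pvRank l < pvRank (pvMergeF fuel r (.node s2 p2 it2 rk2 l2 r2)) then
        .node s p it (pvRank l + 1) (pvMergeF fuel r (.node s2 p2 it2 rk2 l2 r2)) l
      else .node s p it (pvRank (pvMergeF fuel r (.node s2 p2 it2 rk2 l2 r2)) + 1) l
        (pvMergeF fuel r (.node s2 p2 it2 rk2 l2 r2))

def pvMerge (a b : PvHeap) : PvHeap := pvMergeF (pvHeapSize a + pvHeapSize b) a b

-- the final while-loop of Source B: pop every remaining bucket in key order
-- (fuel = node count again, a totality guard only)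
def pvDrainF : Nat → PvHeap → List (List Int)
  | 0, _ => []
  | _, .nil => []
  | fuel + 1, .node _ _ it _ l r => it :: pvDrainF fuel (pvMerge l r)

def pvDrain (h : PvHeap) : List (List Int) := pvDrainF (pvHeapSize h) h

-- the for-loop of Source B: state = (remaining order, heap, next_prio, final buckets)
def pvLoopB (sizes : List Int) (maxB : Int) : List Int → PvHeap → Int → List (List Int) → List (List Int)
  | [], h, _, final => final ++ pvDrain h
  | i :: rest, h, np, final =>
    match h with
    | .nil => final  -- unreachable under Pre_ (Python raises unpacking None)
    | .node s _ it _ l r =>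
      let h' := pvMerge l r
      let it' := it ++ [i]
      if PySem.List.len it' == maxB then
        pvLoopB sizes maxB rest h' np (final ++ [it'])
      else
        pvLoopB sizes maxB rest
          (pvMerge h' (.node (s + PySem.List.pyGetD sizes i 0) np it' 1 .nil .nil)) (np - 1) final

def distribute_to_buckets_alt (sizes : List Int) (buckets_num : Int) : List (List Int) :=
  let max_bucket_size := -(PySem.Int.floordiv (-(PySem.List.len sizes)) buckets_num)
  let order := PySem.List.sorted (PySem.List.pyRange 0 (PySem.List.len sizes) 1)
    (fun i => -(PySem.List.pyGetD sizes i 0)) false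
  let heap := ((List.range buckets_num.toNat).reverse).foldl
    (fun h k => PvHeap.node 0 (Int.ofNat k) [] 1 h .nil) .nil
  pvLoopB sizes max_bucket_size order heap (-1) []

-- ===== PRECONDITION & SPEC =====
-- Pre_ excludes exactly the inputs on which A raises: buckets_num = 0 (ZeroDivisionError)
-- and buckets_num < 0 with a nonempty sizes (IndexError on buckets[0]).
def Pre_distribute_to_buckets (sizes : List Int) (buckets_num : Int) : Prop :=
  0 < buckets_num ∨ (sizes = [] ∧ buckets_num ≠ 0)
instance (sizes : List Int) (buckets_num : Int) : Decidable (Pre_distribute_to_buckets sizes buckets_num) := by unfold Pre_distribute_to_buckets; infer_instance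

def pvWitness_distribute_to_buckets : List Int × Int := ([3, 1, 2, 1], 2)

def Spec_distribute_to_buckets (sizes : List Int) (buckets_num : Int) (out : List (List Int)) : Prop := out = distribute_to_buckets_alt sizes buckets_num
instance (sizes : List Int) (buckets_num : Int) (out : List (List Int)) : Decidable (Spec_distribute_to_buckets sizes buckets_num out) := by unfold Spec_distribute_to_buckets; infer_instance

-- ===== CLAIM (what is proved, stated in full; the proofs are below) =====
def Claim_equal_distribute_to_buckets : Prop := ∀ (sizes : List Int) (buckets_num : Int), Dom_distribute_to_buckets sizes buckets_num → Pre_distribute_to_buckets sizes buckets_num → Spec_distribute_to_buckets sizes buckets_num (distribute_to_buckets sizes buckets_num)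

-- ===== LEMMAS AND PROOFS =====

-- ---- A-side: the two argsorts agree ----
theorem pv_sorted_rev_eq_neg_key {α : Type} (xs : List α) (key : α → Int) :
    PySem.List.sorted xs key true = PySem.List.sorted xs (fun x => -(key x)) false := by
  rw [PySem.List.sorted_rev_eq_foldl_insertBy, PySem.List.sorted_eq_foldl_insertBy]
  congr 1
  funext acc x
  congr 1
  funext a b
  simp

theorem pv_insertBy_map {α β : Type} (f : α → β) (bf : β → β → Bool) (bf' : α → α → Bool)
    (h : ∀ a b, bf (f a) (f b) = bf' a b) (x : α) (l : List α) :
    PySem.List.insertBy bf (f x) (l.map f) = (PySem.List.insertBy bf' x l).map f := by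
  induction l with
  | nil => simp [PySem.List.insertBy]
  | cons y ys ih =>
    simp only [List.map_cons, PySem.List.insertBy, h]
    by_cases hb : bf' x y = true
    · simp [hb]
    · simp [hb, ih]

theorem pv_sorted_map {α β : Type} (f : α → β) (key : β → Int) (l : List α) :
    PySem.List.sorted (l.map f) key false = (PySem.List.sorted l (fun x => key (f x)) false).map f := by
  rw [PySem.List.sorted_eq_foldl_insertBy, PySem.List.sorted_eq_foldl_insertBy]
  suffices h : ∀ acc : List α,
      (l.map f).foldl (fun acc x => PySem.List.insertBy (fun a b => decide (key a < key b)) x acc) (acc.map f)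
        = (l.foldl (fun acc x => PySem.List.insertBy (fun a b => decide (key (f a) < key (f b))) x acc) acc).map f by
    simpa using h []
  induction l with
  | nil => intro acc; simp
  | cons x xs ih =>
    intro acc
    simp only [List.map_cons, List.foldl_cons]
    rw [pv_insertBy_map f _ _ (fun a b => rfl) x acc]
    exact ih _

theorem pv_argsort_eq (sizes : List Int) :
    pvArgsortRev sizes
      = PySem.List.sorted (PySem.List.pyRange 0 (PySem.List.len sizes) 1)
          (fun i => -(PySem.List.pyGetD sizes i 0)) false := by
  unfold pvArgsortRev
  rw [PySem.List.enumerate_eq_map_pyRange (d := 0), List.map_map]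
  rw [pv_sorted_rev_eq_neg_key, pv_sorted_map]
  simp only [List.map_map]
  have hid : ((fun p : Int × Int => p.2) ∘ (fun p : Int × Int => (p.2, p.1))
      ∘ (fun j : Int => (j, PySem.List.pyGetD sizes j 0))) = id := rfl
  simp [hid]

-- ---- A-side: stable insert into an already key-sorted list ----
def pvInsLE {α : Type} (key : α → Int) (x : α) : List α → List α
  | [] => [x]
  | y :: ys => if key y < key x then y :: pvInsLE key x ys else x :: y :: ys

theorem pv_foldl_ins_cons {α : Type} (key : α → Int) (y : α) (l : List α)
    (h : ∀ z ∈ l, ¬ key z < key y) (acc : List α) :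
    l.foldl (fun acc x => PySem.List.insertBy (fun a b => decide (key a < key b)) x acc) (y :: acc)
      = y :: l.foldl (fun acc x => PySem.List.insertBy (fun a b => decide (key a < key b)) x acc) acc := by
  induction l generalizing acc with
  | nil => rfl
  | cons z zs ih =>
    simp only [List.foldl_cons]
    have hz : ¬ key z < key y := h z (by simp)
    rw [show PySem.List.insertBy (fun a b => decide (key a < key b)) z (y :: acc)
        = y :: PySem.List.insertBy (fun a b => decide (key a < key b)) z acc by
      simp [PySem.List.insertBy, hz]]
    exact ih (fun w hw => h w (by simp [hw])) _

theorem pv_sorted_cons_of_pairwise {α : Type} (key : α → Int) (x : α) (l : List α)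
    (h : l.Pairwise (fun a b => key a ≤ key b)) :
    PySem.List.sorted (x :: l) key false = pvInsLE key x l := by
  rw [PySem.List.sorted_eq_foldl_insertBy]
  simp only [List.foldl_cons]
  have hx : PySem.List.insertBy (fun a b => decide (key a < key b)) x [] = [x] := rfl
  rw [hx]
  induction l with
  | nil => rfl
  | cons y ys ih =>
    rcases List.pairwise_cons.mp h with ⟨hy, hys⟩
    simp only [List.foldl_cons, pvInsLE]
    by_cases hb : key y < key x
    · rw [show PySem.List.insertBy (fun a b => decide (key a < key b)) y [x]
          = [y, x] by simp [PySem.List.insertBy, hb]]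
      rw [pv_foldl_ins_cons key y ys (fun z hz => by have := hy z hz; omega) [x]]
      rw [if_pos hb]
      rw [ih hys]
    · rw [show PySem.List.insertBy (fun a b => decide (key a < key b)) y [x]
          = [x, y] by simp [PySem.List.insertBy, hb]]
      rw [pv_foldl_ins_cons key x ys (fun z hz => by have := hy z hz; omega) [y]]
      rw [pv_foldl_ins_cons key y ys (fun z hz => by have := hy z hz; omega) []]
      have : ys.foldl (fun acc x => PySem.List.insertBy (fun a b => decide (key a < key b)) x acc) [] = ys := by
        rw [← PySem.List.sorted_eq_foldl_insertBy]
        exact PySem.List.sorted_eq_self_of_pairwise ys key hys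
      rw [this, if_neg hb]

-- ---- B-side: heap facts over the (sum, priority) key ----
-- lexicographic key order on (sum, priority)
def pvKLt (a b : Int × Int) : Prop := a.1 < b.1 ∨ (a.1 = b.1 ∧ a.2 < b.2)
def pvKLe (a b : Int × Int) : Prop := a.1 < b.1 ∨ (a.1 = b.1 ∧ a.2 ≤ b.2)

def pvKey (q : Int × Int × List Int) : Int × Int := (q.1, q.2.1)

def pvElems : PvHeap → List (Int × Int × List Int)
  | .nil => []
  | .node s p it _ l r => (s, p, it) :: (pvElems l ++ pvElems r)

-- heap order: every root key is ≤ all keys below it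
def pvHOrd : PvHeap → Prop
  | .nil => True
  | .node s p _ _ l r => pvHOrd l ∧ pvHOrd r ∧ ∀ q ∈ pvElems l ++ pvElems r, pvKLe (s, p) (pvKey q)

theorem pv_klt_kle_trans (a b c : Int × Int) (h1 : pvKLt a b) (h2 : pvKLe b c) : pvKLe a c := by
  simp only [pvKLt, pvKLe] at *; omega

theorem pv_kle_kle_trans (a b c : Int × Int) (h1 : pvKLe a b) (h2 : pvKLe b c) : pvKLe a c := by
  simp only [pvKLe] at *; omega

theorem pv_kle_refl (a : Int × Int) : pvKLe a a := Or.inr ⟨rfl, le_refl _⟩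

theorem pv_not_klt_kle (a b : Int × Int) (h : ¬ pvKLt a b) : pvKLe b a := by
  simp only [pvKLt, pvKLe] at *; omega

theorem pvMergeF_size (fuel : Nat) : ∀ (a b : PvHeap), pvHeapSize a + pvHeapSize b ≤ fuel →
    pvHeapSize (pvMergeF fuel a b) = pvHeapSize a + pvHeapSize b := by
  induction fuel with
  | zero =>
    intro a b h
    cases a <;> cases b <;> simp_all [pvMergeF, pvHeapSize]
  | succ fuel ih =>
    intro a b h
    cases a with
    | nil => simp [pvMergeF, pvHeapSize]
    | node s p it rk l r =>
      cases b with
      | nil => simp [pvMergeF, pvHeapSize]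
      | node s2 p2 it2 rk2 l2 r2 =>
        have h1 : pvHeapSize r2 + pvHeapSize (PvHeap.node s p it rk l r) ≤ fuel := by
          simp only [pvHeapSize] at h ⊢; omega
        have h2 : pvHeapSize r + pvHeapSize (PvHeap.node s2 p2 it2 rk2 l2 r2) ≤ fuel := by
          simp only [pvHeapSize] at h ⊢; omega
        have e1 := ih r2 (.node s p it rk l r) h1
        have e2 := ih r (.node s2 p2 it2 rk2 l2 r2) h2
        simp only [pvMergeF]
        split_ifs <;> simp only [pvHeapSize] at * <;> omega

theorem pvMerge_size (a b : PvHeap) :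
    pvHeapSize (pvMerge a b) = pvHeapSize a + pvHeapSize b :=
  pvMergeF_size _ a b le_rfl

theorem pvMergeF_elems (fuel : Nat) : ∀ (a b : PvHeap), pvHeapSize a + pvHeapSize b ≤ fuel →
    List.Perm (pvElems (pvMergeF fuel a b)) (pvElems a ++ pvElems b) := by
  induction fuel with
  | zero =>
    intro a b h
    cases a <;> cases b <;> simp_all [pvMergeF, pvHeapSize, pvElems]
  | succ fuel ih =>
    intro a b h
    cases a with
    | nil => simp [pvMergeF, pvElems]
    | node s p it rk l r =>
      cases b with
      | nil => simp [pvMergeF, pvElems]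
      | node s2 p2 it2 rk2 l2 r2 =>
        have h1 : pvHeapSize r2 + pvHeapSize (PvHeap.node s p it rk l r) ≤ fuel := by
          simp only [pvHeapSize] at h ⊢; omega
        have h2 : pvHeapSize r + pvHeapSize (PvHeap.node s2 p2 it2 rk2 l2 r2) ≤ fuel := by
          simp only [pvHeapSize] at h ⊢; omega
        have e1 := ih r2 (.node s p it rk l r) h1
        have e2 := ih r (.node s2 p2 it2 rk2 l2 r2) h2
        simp only [pvMergeF]
        split_ifs <;>
          (simp only [pvElems] at e1 e2 ⊢;
           rw [← Multiset.coe_eq_coe] at e1 e2 ⊢;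
           simp only [← Multiset.cons_coe, ← Multiset.coe_add] at e1 e2 ⊢;
           simp only [← Multiset.singleton_add] at e1 e2 ⊢) <;>
          first
          | (rw [e1]; abel)
          | (rw [e2]; abel)

theorem pv_merge_elems (a b : PvHeap) :
    List.Perm (pvElems (pvMerge a b)) (pvElems a ++ pvElems b) :=
  pvMergeF_elems _ a b le_rfl

theorem pv_root_min (s p : Int) (it : List Int) (rk : Int) (l r : PvHeap)
    (h : pvHOrd (.node s p it rk l r)) :
    ∀ q ∈ pvElems (.node s p it rk l r), pvKLe (s, p) (pvKey q) := by
  intro q hq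
  simp only [pvElems, List.mem_cons] at hq
  rcases hq with h1 | h2
  · subst h1; exact pv_kle_refl _
  · exact h.2.2 q h2

theorem pvMergeF_hord (fuel : Nat) : ∀ (a b : PvHeap), pvHeapSize a + pvHeapSize b ≤ fuel →
    pvHOrd a → pvHOrd b → pvHOrd (pvMergeF fuel a b) := by
  induction fuel with
  | zero =>
    intro a b h _ _
    cases a <;> cases b <;> simp_all [pvMergeF, pvHOrd, pvHeapSize]
  | succ fuel ih =>
    intro a b h ha hb
    cases a with
    | nil => simpa [pvMergeF] using hb
    | node s p it rk l r =>
      cases b with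
      | nil => simpa [pvMergeF] using ha
      | node s2 p2 it2 rk2 l2 r2 =>
        have h1 : pvHeapSize r2 + pvHeapSize (PvHeap.node s p it rk l r) ≤ fuel := by
          simp only [pvHeapSize] at h ⊢; omega
        have h2 : pvHeapSize r + pvHeapSize (PvHeap.node s2 p2 it2 rk2 l2 r2) ≤ fuel := by
          simp only [pvHeapSize] at h ⊢; omega
        have hm1 := ih r2 (.node s p it rk l r) h1 hb.2.1 ha
        have hm2 := ih r (.node s2 p2 it2 rk2 l2 r2) h2 ha.2.1 hb
        have hmem1 : ∀ q : Int × Int × List Int,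
            q ∈ pvElems (pvMergeF fuel r2 (.node s p it rk l r))
              ↔ q ∈ pvElems r2 ++ pvElems (PvHeap.node s p it rk l r) :=
          fun q => (pvMergeF_elems fuel r2 (.node s p it rk l r) h1).mem_iff
        have hmem2 : ∀ q : Int × Int × List Int,
            q ∈ pvElems (pvMergeF fuel r (.node s2 p2 it2 rk2 l2 r2))
              ↔ q ∈ pvElems r ++ pvElems (PvHeap.node s2 p2 it2 rk2 l2 r2) :=
          fun q => (pvMergeF_elems fuel r (.node s2 p2 it2 rk2 l2 r2) h2).mem_iff
        simp only [pvMergeF]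
        split_ifs with hc hr1 hr2
        · refine ⟨hm1, hb.1, ?_⟩
          intro q hq
          rcases List.mem_append.mp hq with hm | hl2
          · rcases List.mem_append.mp ((hmem1 q).mp hm) with hq1 | hq2
            · exact hb.2.2 q (List.mem_append.mpr (Or.inr hq1))
            · exact pv_klt_kle_trans _ (s, p) _ hc (pv_root_min s p it rk l r ha q hq2)
          · exact hb.2.2 q (List.mem_append.mpr (Or.inl hl2))
        · refine ⟨hb.1, hm1, ?_⟩
          intro q hq
          rcases List.mem_append.mp hq with hl2 | hm
          · exact hb.2.2 q (List.mem_append.mpr (Or.inl hl2))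
          · rcases List.mem_append.mp ((hmem1 q).mp hm) with hq1 | hq2
            · exact hb.2.2 q (List.mem_append.mpr (Or.inr hq1))
            · exact pv_klt_kle_trans _ (s, p) _ hc (pv_root_min s p it rk l r ha q hq2)
        · refine ⟨hm2, ha.1, ?_⟩
          intro q hq
          rcases List.mem_append.mp hq with hm | hl
          · rcases List.mem_append.mp ((hmem2 q).mp hm) with hq1 | hq2
            · exact ha.2.2 q (List.mem_append.mpr (Or.inr hq1))
            · exact pv_kle_kle_trans _ (s2, p2) _ (pv_not_klt_kle _ _ hc)
                (pv_root_min s2 p2 it2 rk2 l2 r2 hb q hq2)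
          · exact ha.2.2 q (List.mem_append.mpr (Or.inl hl))
        · refine ⟨ha.1, hm2, ?_⟩
          intro q hq
          rcases List.mem_append.mp hq with hl | hm
          · exact ha.2.2 q (List.mem_append.mpr (Or.inl hl))
          · rcases List.mem_append.mp ((hmem2 q).mp hm) with hq1 | hq2
            · exact ha.2.2 q (List.mem_append.mpr (Or.inr hq1))
            · exact pv_kle_kle_trans _ (s2, p2) _ (pv_not_klt_kle _ _ hc)
                (pv_root_min s2 p2 it2 rk2 l2 r2 hb q hq2)

theorem pv_merge_hord (a b : PvHeap) (ha : pvHOrd a) (hb : pvHOrd b) : pvHOrd (pvMerge a b) :=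
  pvMergeF_hord _ a b le_rfl ha hb

-- a strictly key-sorted permutation of the heap contents starts with the root
theorem pv_head_of_min (L A : List (Int × Int × List Int)) (x : Int × Int × List Int)
    (hpw : L.Pairwise (fun a b => pvKLt (pvKey a) (pvKey b)))
    (hperm : List.Perm (x :: A) L)
    (hmin : ∀ q ∈ x :: A, pvKLe (pvKey x) (pvKey q)) :
    ∃ L', L = x :: L' ∧ List.Perm A L' := by
  match L with
  | [] => exact absurd hperm.symm (by simp)
  | y :: L' =>
    have hxy : x = y := by
      have hxL : x ∈ y :: L' := hperm.mem_iff.mp (by simp)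
      have hyA : y ∈ x :: A := hperm.symm.mem_iff.mp (by simp)
      rcases List.mem_cons.mp hxL with h1 | h2
      · exact h1
      · exfalso
        have hlt : pvKLt (pvKey y) (pvKey x) := (List.pairwise_cons.mp hpw).1 x h2
        have hle : pvKLe (pvKey x) (pvKey y) := hmin y hyA
        simp only [pvKLt, pvKLe] at hlt hle; omega
    subst hxy
    exact ⟨L', rfl, hperm.cons_inv⟩

-- ---- the bridge: B's heap loop computes A's sorted-list loop ----
def pvInsK (x : Int × Int × List Int) : List (Int × Int × List Int) → List (Int × Int × List Int)
  | [] => [x]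
  | q :: rest => if q.1 < x.1 then q :: pvInsK x rest else x :: q :: rest

theorem pv_insK_perm (x : Int × Int × List Int) (L : List (Int × Int × List Int)) :
    List.Perm (pvInsK x L) (x :: L) := by
  induction L with
  | nil => simp [pvInsK]
  | cons q rest ih =>
    simp only [pvInsK]
    by_cases h : q.1 < x.1
    · rw [if_pos h]
      exact (ih.cons q).trans (List.Perm.swap x q rest)
    · rw [if_neg h]

theorem pv_mem_insK (x q : Int × Int × List Int) (L : List (Int × Int × List Int)) :
    q ∈ pvInsK x L ↔ q = x ∨ q ∈ L := by
  have := (pv_insK_perm x L).mem_iff (a := q)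
  simpa using this

theorem pv_insK_pairwise (x : Int × Int × List Int) (L : List (Int × Int × List Int))
    (hpw : L.Pairwise (fun a b => pvKLt (pvKey a) (pvKey b)))
    (htot : ∀ q ∈ L, (q.1 < x.1 ∧ pvKLt (pvKey q) (pvKey x)) ∨ (¬ q.1 < x.1 ∧ pvKLt (pvKey x) (pvKey q))) :
    (pvInsK x L).Pairwise (fun a b => pvKLt (pvKey a) (pvKey b)) := by
  induction L with
  | nil => simp [pvInsK]
  | cons q rest ih =>
    rcases List.pairwise_cons.mp hpw with ⟨hq, hrest⟩
    by_cases h : q.1 < x.1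
    · simp only [pvInsK, if_pos h]
      refine List.pairwise_cons.mpr ⟨?_, ih hrest (fun w hw => htot w (by simp [hw]))⟩
      intro w hw
      rcases (pv_mem_insK x w rest).mp hw with h1 | h2
      · subst h1
        rcases htot q (by simp) with ⟨_, h3⟩ | ⟨h3, _⟩
        · exact h3
        · exact absurd h h3
      · exact hq w h2
    · simp only [pvInsK, if_neg h]
      refine List.pairwise_cons.mpr ⟨?_, hpw⟩
      intro w hw
      rcases List.mem_cons.mp hw with h1 | h2
      · subst h1
        rcases htot w (by simp) with ⟨h3, _⟩ | ⟨_, h3⟩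
        · exact absurd h3 h
        · exact h3
      · rcases htot w (by simp [h2]) with ⟨_, h3⟩ | ⟨_, h3⟩
        · -- w.1 < x.1 would contradict pairwise through q?  Not needed: we need pvKLt x w.
          -- from htot on q: ¬ q.1 < x.1 → pvKLt x q; and q pairwise-lt w gives pvKLt q w.
          rcases htot q (by simp) with ⟨h4, _⟩ | ⟨_, h4⟩
          · exact absurd h4 h
          · have h5 := hq w h2
            simp only [pvKLt] at *; omega
        · exact h3

theorem pv_insK_map_snd (sizes : List Int) (x : Int × Int × List Int)
    (L : List (Int × Int × List Int))
    (hsum : ∀ q ∈ L, q.1 = pvSumSizes sizes q.2.2) (hx : x.1 = pvSumSizes sizes x.2.2) :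
    (pvInsK x L).map (fun q => q.2.2)
      = pvInsLE (pvSumSizes sizes) x.2.2 (L.map (fun q => q.2.2)) := by
  induction L with
  | nil => simp [pvInsK, pvInsLE]
  | cons q rest ih =>
    have hq : q.1 = pvSumSizes sizes q.2.2 := hsum q (by simp)
    by_cases h : q.1 < x.1
    · simp only [pvInsK, if_pos h, List.map_cons, pvInsLE]
      rw [if_pos (by rw [← hq, ← hx]; exact h)]
      rw [ih (fun w hw => hsum w (by simp [hw]))]
    · simp only [pvInsK, if_neg h, List.map_cons, pvInsLE]
      rw [if_neg (by rw [← hq, ← hx]; exact h)]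

theorem pv_sumSizes_append (sizes b : List Int) (i : Int) :
    pvSumSizes sizes (b ++ [i]) = pvSumSizes sizes b + PySem.List.pyGetD sizes i 0 := by
  simp [pvSumSizes]

-- pairwise key order plus cached sums gives pairwise sum order on the projected buckets
theorem pv_pairwise_sum (sizes : List Int) (L : List (Int × Int × List Int))
    (hpw : L.Pairwise (fun a b => pvKLt (pvKey a) (pvKey b)))
    (hsum : ∀ q ∈ L, q.1 = pvSumSizes sizes q.2.2) :
    (L.map (fun q => q.2.2)).Pairwise
      (fun a b => pvSumSizes sizes a ≤ pvSumSizes sizes b) := by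
  rw [List.pairwise_map]
  refine hpw.imp_of_mem ?_
  intro a b ha hb h
  rw [← hsum a ha, ← hsum b hb]
  simp only [pvKLt, pvKey] at h
  omega

-- the drain loop pops the remaining buckets in exact key order
theorem pv_drainF_eq (L : List (Int × Int × List Int)) :
    ∀ (fuel : Nat) (h : PvHeap), pvHeapSize h ≤ fuel → pvHOrd h → List.Perm (pvElems h) L →
    L.Pairwise (fun a b => pvKLt (pvKey a) (pvKey b)) →
    pvDrainF fuel h = L.map (fun q => q.2.2) := by
  induction L with
  | nil =>
    intro fuel h _ _ hperm _
    match h with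
    | .nil => cases fuel <;> rfl
    | .node s p it rk l r => exact absurd hperm (by simp [pvElems])
  | cons y L' ih =>
    intro fuel h hf hord hperm hpw
    match h with
    | .nil => exact absurd hperm.symm (by simp [pvElems])
    | .node s p it rk l r =>
      obtain ⟨L'', hL, hperm'⟩ := pv_head_of_min (y :: L') (pvElems l ++ pvElems r) (s, p, it) hpw
        (by simpa [pvElems] using hperm) (pv_root_min s p it rk l r hord)
      injection hL with h1 h2
      subst h1
      subst h2
      match fuel with
      | 0 => simp [pvHeapSize] at hf
      | fuel + 1 =>
        simp only [pvDrainF]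
        rw [ih fuel (pvMerge l r)
          (by rw [pvMerge_size]; simp only [pvHeapSize] at hf; omega)
          (pv_merge_hord l r hord.1 hord.2.1)
          ((pv_merge_elems l r).trans hperm') (List.pairwise_cons.mp hpw).2]
        simp

theorem pv_drain_eq (L : List (Int × Int × List Int)) (h : PvHeap)
    (hord : pvHOrd h) (hperm : List.Perm (pvElems h) L)
    (hpw : L.Pairwise (fun a b => pvKLt (pvKey a) (pvKey b))) :
    pvDrain h = L.map (fun q => q.2.2) :=
  pv_drainF_eq L (pvHeapSize h) h le_rfl hord hperm hpw

theorem pv_loop_eq (sizes : List Int) (maxB : Int) (idx : List Int) :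
    ∀ (h : PvHeap) (np : Int) (L : List (Int × Int × List Int)) (final : List (List Int)),
    pvHOrd h → List.Perm (pvElems h) L →
    L.Pairwise (fun a b => pvKLt (pvKey a) (pvKey b)) →
    (∀ q ∈ L, q.1 = pvSumSizes sizes q.2.2) →
    (∀ q ∈ L, np < q.2.1) →
    pvLoopB sizes maxB idx h np final = pvLoopA sizes maxB idx (L.map (fun q => q.2.2)) final := by
  induction idx with
  | nil =>
    intro h np L final hord hperm hpw _ _
    simp only [pvLoopB, pvLoopA]
    rw [pv_drain_eq L h hord hperm hpw]
  | cons i rest ih =>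
    intro h np L final hord hperm hpw hsum hnp
    match h with
    | .nil =>
      have hL : L = [] := (by simpa [pvElems] using hperm.symm : L.Perm []).eq_nil
      subst hL
      rfl
    | .node s p it rk l r =>
      obtain ⟨L', hL, hperm'⟩ := pv_head_of_min L (pvElems l ++ pvElems r) (s, p, it) hpw
        (by simpa [pvElems] using hperm) (pv_root_min s p it rk l r hord)
      subst hL
      have hpw' := (List.pairwise_cons.mp hpw).2
      have hsum' : ∀ q ∈ L', q.1 = pvSumSizes sizes q.2.2 := fun q hq => hsum q (by simp [hq])
      have hnp' : ∀ q ∈ L', np < q.2.1 := fun q hq => hnp q (by simp [hq])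
      have hs : s = pvSumSizes sizes it := hsum (s, p, it) (by simp)
      simp only [pvLoopB, pvLoopA, List.map_cons]
      by_cases hfull : (PySem.List.len (it ++ [i]) == maxB) = true
      · rw [if_pos (by simpa using hfull), if_pos (by simpa using hfull)]
        rw [PySem.List.sorted_eq_self_of_pairwise _ _ (pv_pairwise_sum sizes L' hpw' hsum')]
        exact ih (pvMerge l r) np L' (final ++ [it ++ [i]])
          (pv_merge_hord l r hord.1 hord.2.1) ((pv_merge_elems l r).trans hperm') hpw' hsum' hnp'
      · rw [if_neg (by simpa using hfull), if_neg (by simpa using hfull)]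
        have hx : (s + PySem.List.pyGetD sizes i 0, np, it ++ [i]).1
            = pvSumSizes sizes (s + PySem.List.pyGetD sizes i 0, np, it ++ [i]).2.2 := by
          simp only [pv_sumSizes_append, hs]
        rw [pv_sorted_cons_of_pairwise _ _ _ (pv_pairwise_sum sizes L' hpw' hsum')]
        rw [show pvInsLE (pvSumSizes sizes) (it ++ [i]) (L'.map (fun q => q.2.2))
            = (pvInsK (s + PySem.List.pyGetD sizes i 0, np, it ++ [i]) L').map (fun q => q.2.2) from
          (pv_insK_map_snd sizes _ L' hsum' hx).symm]
        refine ih _ (np - 1) (pvInsK (s + PySem.List.pyGetD sizes i 0, np, it ++ [i]) L') final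
          ?_ ?_ ?_ ?_ ?_
        · exact pv_merge_hord _ _ (pv_merge_hord l r hord.1 hord.2.1)
            ⟨trivial, trivial, by simp [pvElems]⟩
        · refine (pv_merge_elems _ _).trans ?_
          have h1 : List.Perm (pvElems (pvMerge l r)
              ++ pvElems (.node (s + PySem.List.pyGetD sizes i 0) np (it ++ [i]) 1 .nil .nil))
              (L' ++ [(s + PySem.List.pyGetD sizes i 0, np, it ++ [i])]) := by
            exact ((pv_merge_elems l r).trans hperm').append (by simp [pvElems])
          refine h1.trans ?_
          exact (List.perm_append_singleton _ _).trans (pv_insK_perm _ _).symm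
        · refine pv_insK_pairwise _ L' hpw' ?_
          intro q hq
          have h1 := hsum' q hq
          have h2 := hnp' q hq
          by_cases h3 : q.1 < s + PySem.List.pyGetD sizes i 0
          · exact Or.inl ⟨h3, by simp only [pvKLt, pvKey]; omega⟩
          · exact Or.inr ⟨h3, by simp only [pvKLt, pvKey]; omega⟩
        · intro q hq
          rcases (pv_mem_insK _ q L').mp hq with h1 | h2
          · subst h1; exact hx
          · exact hsum' q h2
        · intro q hq
          rcases (pv_mem_insK _ q L').mp hq with h1 | h2
          · subst h1; simp
          · have := hnp' q h2; omega

-- initial heap: the left spine built over ascending keys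
theorem pv_spine_elems (ks : List Nat) :
    pvElems (ks.foldr (fun k h => PvHeap.node 0 (Int.ofNat k) [] 1 h .nil) .nil)
      = ks.map (fun k => ((0 : Int), (Int.ofNat k), ([] : List Int))) := by
  induction ks with
  | nil => rfl
  | cons k rest ih =>
    simp only [List.foldr_cons, pvElems, List.map_cons, List.append_nil]
    rw [ih]

theorem pv_spine_hord (ks : List Nat) (h : ks.Pairwise (· ≤ ·)) :
    pvHOrd (ks.foldr (fun k h => PvHeap.node 0 (Int.ofNat k) [] 1 h .nil) .nil) := by
  induction ks with
  | nil => trivial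
  | cons k rest ih =>
    rcases List.pairwise_cons.mp h with ⟨hk, hrest⟩
    refine ⟨ih hrest, trivial, ?_⟩
    intro q hq
    rw [List.mem_append, pv_spine_elems] at hq
    rcases hq with hq | hq
    · obtain ⟨j, hj, rfl⟩ := List.mem_map.mp hq
      exact Or.inr ⟨rfl, by simp only [pvKey, Int.ofNat_eq_natCast]; exact_mod_cast hk j hj⟩
    · simp [pvElems] at hq

theorem distribute_to_buckets_spec : Claim_equal_distribute_to_buckets := by
  intro sizes buckets_num _ _
  unfold Spec_distribute_to_buckets distribute_to_buckets distribute_to_buckets_alt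
  rw [pv_argsort_eq]
  refine Eq.symm ?_
  have hmap : ((List.range buckets_num.toNat).map
      (fun k => ((0 : Int), (Int.ofNat k), ([] : List Int)))).map (fun q => q.2.2)
      = (List.range buckets_num.toNat).map (fun _ => ([] : List Int)) := by
    simp [List.map_map, Function.comp_def]
  rw [← hmap]
  rw [List.foldl_reverse]
  refine pv_loop_eq sizes _ _ _ (-1) _ []
    (pv_spine_hord (List.range buckets_num.toNat) (List.pairwise_le_range))
    (by rw [pv_spine_elems]) ?_ ?_ ?_
  · rw [List.pairwise_map]
    refine (List.pairwise_lt_range (n := buckets_num.toNat)).imp ?_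
    intro a b hab
    exact Or.inr ⟨rfl, by simp only [pvKey, Int.ofNat_eq_natCast]; omega⟩
  · intro q hq
    obtain ⟨k, _, hk⟩ := List.mem_map.mp hq
    rw [← hk]
    simp [pvSumSizes]
  · intro q hq
    obtain ⟨k, _, hk⟩ := List.mem_map.mp hq
    rw [← hk]
    show (-1 : Int) < Int.ofNat k
    simp only [Int.ofNat_eq_natCast]
    omega
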